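-- pv_equiv track=rewrite | github.com/Sharanya-aa/ReVampCV | app.py | suggest_keyword_placement
-- ===== SOURCE A (Python) =====
-- def suggest_keyword_placement(missing_keywords, resume_sections):
--     """Suggest where to place missing keywords"""
--     placement = {}
--
--     for keyword, context in missing_keywords:
--         # Simple heuristic for placement
--         if any(tech in keyword.lower() for tech in ['python', 'java', 'sql', 'aws']):
--             if 'skills' not in placement:
--                 placement['skills'] = []
--             placement['skills'].append(keyword)
--         else:
--             if 'experience' not in placement:
--                 placement['experience'] = []
--             placement['experience'].append(keyword)
--
--     return placement
-- ===== SOURCE B (Python) =====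
-- def suggest_keyword_placement(missing_keywords, resume_sections):
--     """Label each keyword with its bucket, then group by label in first-occurrence order."""
--     techs = ('python', 'java', 'sql', 'aws')
--     labeled = [('skills' if any(t in kw.lower() for t in techs) else 'experience', kw)
--                for kw, _ in missing_keywords]
--     return {cat: [kw for c, kw in labeled if c == cat]
--             for cat in dict.fromkeys(c for c, _ in labeled)}
-- ===== Notes on version B (the rewrite author's own statement) =====
-- stated objective: alternative
-- what changed: Replaces the single classifying loop with lazy dict-bucket creation by a generic label-then-group-by pipeline: label every keyword with its bucket, deduplicate the labels in first-occurrence order, and gather each bucket's keywords from the labeled list.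
import Mathlib
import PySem

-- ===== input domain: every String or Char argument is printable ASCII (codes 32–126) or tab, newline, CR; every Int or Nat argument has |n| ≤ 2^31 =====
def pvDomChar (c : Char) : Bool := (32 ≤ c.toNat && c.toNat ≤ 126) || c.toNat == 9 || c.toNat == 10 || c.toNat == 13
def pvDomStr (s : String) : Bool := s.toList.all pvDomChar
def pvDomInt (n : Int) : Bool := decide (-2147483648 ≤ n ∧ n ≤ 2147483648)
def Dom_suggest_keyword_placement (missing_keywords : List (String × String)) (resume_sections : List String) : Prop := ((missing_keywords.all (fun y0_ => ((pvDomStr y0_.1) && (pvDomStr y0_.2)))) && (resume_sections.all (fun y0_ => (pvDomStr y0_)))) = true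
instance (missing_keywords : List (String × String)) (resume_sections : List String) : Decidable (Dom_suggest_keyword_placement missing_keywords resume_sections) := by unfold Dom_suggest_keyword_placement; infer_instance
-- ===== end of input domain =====

-- B replaces A's classifying loop (lazy dict buckets) by a label / dedup / group-by pipeline (objective: alternative decomposition, same cost).

-- shared heuristic: any(tech in keyword.lower() for tech in ['python','java','sql','aws'])
def pvIsSkill (kw : String) : Bool :=
  (["python", "java", "sql", "aws"]).any (fun t => PySem.Str.isIn t (PySem.Str.lower kw))

-- ===== PORT A =====
-- the loop body of A (lazy bucket creation + append)
def pvStepA (placement : PySem.Dict String (List String)) (p : String × String) :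
    PySem.Dict String (List String) :=
  if pvIsSkill p.1 then
    let placement := if placement.contains "skills" then placement else placement.insert "skills" []
    placement.modify "skills" [] (fun l => l ++ [p.1])
  else
    let placement := if placement.contains "experience" then placement else placement.insert "experience" []
    placement.modify "experience" [] (fun l => l ++ [p.1])

def suggest_keyword_placement (missing_keywords : List (String × String)) (resume_sections : List String) : List (String × List String) :=
  (missing_keywords.foldl pvStepA PySem.Dict.empty).items

-- ===== PORT B =====
def suggest_keyword_placement_alt (missing_keywords : List (String × String)) (resume_sections : List String) : List (String × List String) :=
  let labeled := missing_keywords.map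
    (fun p => ((if pvIsSkill p.1 then "skills" else "experience"), p.1))
  (PySem.List.dedup (labeled.map (·.1))).map
    (fun cat => (cat, (labeled.filter (fun q => q.1 == cat)).map (·.2)))

-- ===== PRECONDITION & SPEC =====
def Spec_suggest_keyword_placement (missing_keywords : List (String × String)) (resume_sections : List String) (out : List (String × List String)) : Prop := out = suggest_keyword_placement_alt missing_keywords resume_sections
instance (missing_keywords : List (String × String)) (resume_sections : List String) (out : List (String × List String)) : Decidable (Spec_suggest_keyword_placement missing_keywords resume_sections out) := by unfold Spec_suggest_keyword_placement; infer_instance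

-- ===== CLAIM (what is proved, stated in full; the proofs are below) =====
def Claim_equal_suggest_keyword_placement : Prop := ∀ (missing_keywords : List (String × String)) (resume_sections : List String), Dom_suggest_keyword_placement missing_keywords resume_sections → Spec_suggest_keyword_placement missing_keywords resume_sections (suggest_keyword_placement missing_keywords resume_sections)

-- ===== LEMMAS AND PROOFS =====

-- canonical shape of A's dict state: skills bucket s, experience bucket e,
-- b = "skills key was inserted first" (only meaningful when both buckets are non-empty)
def pvRender (s e : List String) (b : Bool) : PySem.Dict String (List String) :=
  match s, e with
  | [], [] => PySem.Dict.mk []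
  | _ :: _, [] => PySem.Dict.mk [("skills", s)]
  | [], _ :: _ => PySem.Dict.mk [("experience", e)]
  | _ :: _, _ :: _ =>
      if b then PySem.Dict.mk [("skills", s), ("experience", e)]
      else PySem.Dict.mk [("experience", e), ("skills", s)]

def pvValid (s e : List String) (b : Bool) : Prop :=
  (s = [] → e ≠ [] → b = false) ∧ (e = [] → s ≠ [] → b = true)

def pvSk (l : List (String × String)) : List String :=
  (l.filter (fun p => pvIsSkill p.1)).map (·.1)

def pvEx (l : List (String × String)) : List String :=
  (l.filter (fun p => !pvIsSkill p.1)).map (·.1)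

def pvNextB (s e : List String) (b : Bool) (rest : List (String × String)) : Bool :=
  if s.isEmpty && e.isEmpty then
    match rest with
    | [] => b
    | p :: _ => pvIsSkill p.1
  else b

theorem pvStepA_render (s e : List String) (b : Bool) (p : String × String)
    (hv : pvValid s e b) :
    pvStepA (pvRender s e b) p = pvRender (s ++ pvSk [p]) (e ++ pvEx [p]) (pvNextB s e b [p]) ∧
      pvValid (s ++ pvSk [p]) (e ++ pvEx [p]) (pvNextB s e b [p]) := by
  obtain ⟨h1, h2⟩ := hv
  cases hks : pvIsSkill p.1 <;> cases b <;> cases s <;> cases e <;>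
    simp_all [pvStepA, pvRender, pvSk, pvEx, pvNextB, pvValid, PySem.Dict.contains,
      PySem.Dict.insert, PySem.Dict.modify, PySem.Dict.get?, PySem.Dict.getD]

theorem pvFoldl_render (rest : List (String × String)) (s e : List String) (b : Bool)
    (hv : pvValid s e b) :
    rest.foldl pvStepA (pvRender s e b) =
      pvRender (s ++ pvSk rest) (e ++ pvEx rest) (pvNextB s e b rest) := by
  induction rest generalizing s e b with
  | nil => simp [pvSk, pvEx, pvNextB]
  | cons p t ih =>
    obtain ⟨hstep, hv'⟩ := pvStepA_render s e b p hv
    have := ih _ _ _ hv'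
    simp only [List.foldl_cons, hstep, this]
    have hsk : pvSk (p :: t) = pvSk [p] ++ pvSk t := by
      cases h : pvIsSkill p.1 <;> simp [pvSk, h]
    have hex : pvEx (p :: t) = pvEx [p] ++ pvEx t := by
      cases h : pvIsSkill p.1 <;> simp [pvEx, h]
    rw [hsk, hex, List.append_assoc, List.append_assoc]
    congr 1
    cases s <;> cases e <;> cases h : pvIsSkill p.1 <;>
      simp [pvNextB, pvSk, pvEx, h]

-- ---- B-side lemmas ----

-- the label list of B
def pvLab (l : List (String × String)) : List String :=
  l.map (fun p => if pvIsSkill p.1 then "skills" else "experience")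

theorem pvFoldAdd_sub (ls acc : List String) (h : ∀ x ∈ ls, x ∈ acc) :
    ls.foldl PySem.Set.add acc = acc := by
  induction ls generalizing acc with
  | nil => rfl
  | cons x t ih =>
    have hx : x ∈ acc := h x (by simp)
    simp only [List.foldl_cons]
    have : PySem.Set.add acc x = acc := by
      simp [PySem.Set.add, PySem.Set.contains, hx]
    rw [this]
    exact ih acc (fun y hy => h y (by simp [hy]))

theorem pvFoldAdd_other (ls acc : List String) (v : String) (hv : v ∉ acc)
    (h : ∀ x ∈ ls, x ∈ acc ∨ x = v) :
    ls.foldl PySem.Set.add acc = if v ∈ ls then acc ++ [v] else acc := by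
  induction ls generalizing acc with
  | nil => simp
  | cons x t ih =>
    rcases h x (by simp) with hx | hx
    · simp only [List.foldl_cons]
      have hadd : PySem.Set.add acc x = acc := by
        simp [PySem.Set.add, PySem.Set.contains, hx]
      rw [hadd, ih acc hv (fun y hy => h y (by simp [hy]))]
      have hvx : v ≠ x := fun hh => hv (hh ▸ hx)
      simp [List.mem_cons, hvx]
    · subst hx
      simp only [List.foldl_cons]
      have hadd : PySem.Set.add acc x = acc ++ [x] := by
        simp [PySem.Set.add, PySem.Set.contains, hv]
      rw [hadd, pvFoldAdd_sub t (acc ++ [x]) ?_]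
      · simp
      · intro y hy
        rcases h y (by simp [hy]) with h1 | h1 <;> simp [h1]

theorem pvMem_lab_skills (l : List (String × String)) :
    ("skills" ∈ pvLab l) ↔ pvSk l ≠ [] := by
  induction l with
  | nil => simp [pvLab, pvSk]
  | cons p t ih =>
    cases h : pvIsSkill p.1 <;> simp [pvLab, pvSk, h] at ih ⊢

theorem pvMem_lab_exp (l : List (String × String)) :
    ("experience" ∈ pvLab l) ↔ pvEx l ≠ [] := by
  induction l with
  | nil => simp [pvLab, pvEx]
  | cons p t ih =>
    cases h : pvIsSkill p.1 <;> simp [pvLab, pvEx, h] at ih ⊢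

theorem pvLab_vals (l : List (String × String)) :
    ∀ x ∈ pvLab l, x = "skills" ∨ x = "experience" := by
  intro x hx
  simp [pvLab] at hx
  obtain ⟨a, b, _, hab⟩ := hx
  split at hab <;> simp_all

theorem pvGather_skills (l : List (String × String)) :
    ((l.map (fun p => ((if pvIsSkill p.1 then "skills" else "experience"), p.1))).filter
        (fun q => q.1 == "skills")).map (·.2) = pvSk l := by
  induction l with
  | nil => rfl
  | cons p t ih =>
    cases h : pvIsSkill p.1 <;> simp [pvSk, h] at ih ⊢ <;> simpa [pvSk] using ih

theorem pvGather_exp (l : List (String × String)) :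
    ((l.map (fun p => ((if pvIsSkill p.1 then "skills" else "experience"), p.1))).filter
        (fun q => q.1 == "experience")).map (·.2) = pvEx l := by
  induction l with
  | nil => rfl
  | cons p t ih =>
    cases h : pvIsSkill p.1 <;> simp [pvEx, h] at ih ⊢ <;> simpa [pvEx] using ih

-- dedup of the label list in closed form
theorem pvDedup_lab (l : List (String × String)) :
    PySem.List.dedup (pvLab l) =
      match l with
      | [] => []
      | p :: t =>
          if pvIsSkill p.1
          then "skills" :: (if pvEx t = [] then [] else ["experience"])
          else "experience" :: (if pvSk t = [] then [] else ["skills"]) := by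
  cases l with
  | nil => rfl
  | cons p t =>
    rw [PySem.List.dedup_eq_ofList, PySem.Set.ofList_eq_foldl]
    cases h : pvIsSkill p.1 with
    | true =>
      have hlab : pvLab (p :: t) = "skills" :: pvLab t := by simp [pvLab, h]
      rw [hlab]
      simp only [List.foldl_cons]
      have hadd : PySem.Set.add [] "skills" = ["skills"] := rfl
      rw [hadd, pvFoldAdd_other (pvLab t) ["skills"] "experience" (by decide) ?side]
      · by_cases he : pvEx t = [] <;>
          simp [pvMem_lab_exp t, he, h]
      case side =>
        intro x hx
        rcases pvLab_vals t x hx with h1 | h1 <;> simp [h1]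
    | false =>
      have hlab : pvLab (p :: t) = "experience" :: pvLab t := by simp [pvLab, h]
      rw [hlab]
      simp only [List.foldl_cons]
      have hadd : PySem.Set.add [] "experience" = ["experience"] := rfl
      rw [hadd, pvFoldAdd_other (pvLab t) ["experience"] "skills" (by decide) ?side]
      · by_cases hs : pvSk t = [] <;>
          simp [pvMem_lab_skills t, hs, h]
      case side =>
        intro x hx
        rcases pvLab_vals t x hx with h1 | h1 <;> simp [h1]

-- ===== VERDICT (by name: the statement is the Claim_ definition above) =====
theorem suggest_keyword_placement_spec : Claim_equal_suggest_keyword_placement := by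
  intro mk rs _
  unfold Spec_suggest_keyword_placement suggest_keyword_placement
  have h0 : (PySem.Dict.empty : PySem.Dict String (List String)) = pvRender [] [] false := rfl
  rw [h0, pvFoldl_render mk [] [] false (by simp [pvValid])]
  unfold suggest_keyword_placement_alt
  dsimp only
  have hlabmap : (mk.map (fun p => ((if pvIsSkill p.1 then "skills" else "experience"), p.1))).map (·.1) = pvLab mk := by
    simp [pvLab]
  rw [hlabmap, pvDedup_lab mk, List.nil_append, List.nil_append]
  cases mk with
  | nil => rfl
  | cons p t =>
    cases h : pvIsSkill p.1 with
    | true =>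
      have hsk : pvSk (p :: t) = p.1 :: pvSk t := by simp [pvSk, h]
      have hext : pvEx (p :: t) = pvEx t := by simp [pvEx, h]
      have hb : pvNextB [] [] false (p :: t) = pvIsSkill p.1 := by simp [pvNextB]
      rw [hb, hsk, hext]
      by_cases he : pvEx t = []
      · simp only [h, if_true, he, if_pos]
        simp only [List.map_cons, List.map_nil]
        have hg := pvGather_skills (p :: t)
        simp only [List.map_cons] at hg
        rw [hg, hsk]
        rfl
      · simp only [h, if_true, if_neg he]
        simp only [List.map_cons, List.map_nil]
        have hg := pvGather_skills (p :: t)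
        have hg2 := pvGather_exp (p :: t)
        simp only [List.map_cons] at hg hg2
        rw [hg, hg2, hsk, hext]
        obtain ⟨y, ys, hys⟩ := List.exists_cons_of_ne_nil he
        rw [hys]
        rfl
    | false =>
      have hskt : pvSk (p :: t) = pvSk t := by simp [pvSk, h]
      have hex : pvEx (p :: t) = p.1 :: pvEx t := by simp [pvEx, h]
      have hb : pvNextB [] [] false (p :: t) = pvIsSkill p.1 := by simp [pvNextB]
      rw [hb, hskt, hex]
      by_cases hs : pvSk t = []
      · simp only [h, Bool.false_eq_true, if_false, hs, if_pos]
        simp only [List.map_cons, List.map_nil]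
        have hg := pvGather_exp (p :: t)
        simp only [List.map_cons] at hg
        rw [hg, hex]
        rfl
      · simp only [h, Bool.false_eq_true, if_false, if_neg hs]
        simp only [List.map_cons, List.map_nil]
        have hg := pvGather_exp (p :: t)
        have hg2 := pvGather_skills (p :: t)
        simp only [List.map_cons] at hg hg2
        rw [hg, hg2, hex, hskt]
        obtain ⟨y, ys, hys⟩ := List.exists_cons_of_ne_nil hs
        rw [hys]
        rfl
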